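-- pv_equiv track=rewrite | github.com/raphaelCamblong/whanos | scripts/detect_language.py | compute_prob
-- ===== SOURCE A (Python) =====
-- def compute_prob(detection_lists: list, files: list) -> int:
--     return sum(
--         1
--         for detection in detection_lists
--         for file in files
--         if detection.get("type") == "file_existence"
--         and file == detection.get("filename")
--     )
-- ===== SOURCE B (Python) =====
-- from collections import Counter
--
--
-- def compute_prob(detection_lists: list, files: list) -> int:
--     # Two frequency tables, then an arithmetic sum of products of
--     # multiplicities: each shared filename contributes det[name]*fil[name]
--     # pairs.  (A missing "filename" key yields the None key in det;
--     # fil[None] is 0, so it contributes nothing.)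
--     det = Counter(d.get("filename") for d in detection_lists
--                   if d.get("type") == "file_existence")
--     fil = Counter(files)
--     return sum(cnt * fil[name] for name, cnt in det.items())
-- ===== Notes on version B (the rewrite author's own statement) =====
-- stated objective: faster
-- what changed: Replaced the nested detections x files pair enumeration by two frequency tables (one of file_existence detection filenames, one of files) combined as a sum of products of multiplicities over the detection table's keys.
import Mathlib
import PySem

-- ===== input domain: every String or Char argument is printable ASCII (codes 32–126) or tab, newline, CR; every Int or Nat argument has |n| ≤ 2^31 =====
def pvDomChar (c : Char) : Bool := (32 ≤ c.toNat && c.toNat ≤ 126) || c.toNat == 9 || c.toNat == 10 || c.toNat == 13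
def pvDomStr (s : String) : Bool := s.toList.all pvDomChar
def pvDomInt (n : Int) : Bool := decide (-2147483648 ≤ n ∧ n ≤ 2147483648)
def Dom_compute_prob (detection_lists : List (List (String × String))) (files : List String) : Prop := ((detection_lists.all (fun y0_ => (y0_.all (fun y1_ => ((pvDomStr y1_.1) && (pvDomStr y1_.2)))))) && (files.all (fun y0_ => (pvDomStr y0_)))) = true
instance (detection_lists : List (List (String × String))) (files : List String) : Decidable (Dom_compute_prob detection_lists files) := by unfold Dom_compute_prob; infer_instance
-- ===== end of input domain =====

-- B replaces the nested pair enumeration by two frequency tables combined as a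
-- sum of products of multiplicities (objective: faster).

-- ===== PORT A =====
-- nested generator: for detection in detection_lists, for file in files, count 1 on the condition
def compute_prob (detection_lists : List (List (String × String))) (files : List String) : Int :=
  detection_lists.foldl (fun acc detection =>
    files.foldl (fun acc2 file =>
      if (PySem.Dict.mk detection).get? "type" = some "file_existence" ∧
         some file = (PySem.Dict.mk detection).get? "filename" then acc2 + 1 else acc2) acc) 0

-- ===== PORT B =====
-- det = Counter(d.get("filename") for d in detection_lists if d.get("type") == "file_existence")
-- fil = Counter(files); sum(cnt * fil[name] for name, cnt in det.items())
-- (fil[None] is 0 in Python: the `none` branch below)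
def compute_prob_alt (detection_lists : List (List (String × String))) (files : List String) : Int :=
  let det := PySem.Dict.counter
    ((detection_lists.filter
        (fun d => (PySem.Dict.mk d).get? "type" == some "file_existence")).map
      (fun d => (PySem.Dict.mk d).get? "filename"))
  let fil := PySem.Dict.counter files
  det.items.foldl (fun total kv =>
    total + kv.2 * (match kv.1 with
                    | none => 0
                    | some n => fil.getD n 0)) 0

-- ===== PRECONDITION & SPEC =====
def Spec_compute_prob (detection_lists : List (List (String × String))) (files : List String) (out : Int) : Prop := out = compute_prob_alt detection_lists files
instance (detection_lists : List (List (String × String))) (files : List String) (out : Int) : Decidable (Spec_compute_prob detection_lists files out) := by unfold Spec_compute_prob; infer_instance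

-- ===== CLAIM (what is proved, stated in full; the proofs are below) =====
def Claim_equal_compute_prob : Prop := ∀ (detection_lists : List (List (String × String))) (files : List String), Dom_compute_prob detection_lists files → Spec_compute_prob detection_lists files (compute_prob detection_lists files)

-- ===== LEMMAS AND PROOFS =====

-- the value a single matching detection's filename contributes per occurrence in `files`
def pvH (files : List String) (o : Option String) : Int :=
  match o with
  | none => 0
  | some n => (PySem.Dict.counter files).getD n 0

-- A's inner loop over files, for one detection, equals `if cond then pvH (filename) else 0`.
lemma inner_eq (detection : List (String × String)) (files : List String) (acc : Int) :
    files.foldl (fun acc2 file =>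
      if (PySem.Dict.mk detection).get? "type" = some "file_existence" ∧
         some file = (PySem.Dict.mk detection).get? "filename" then acc2 + 1 else acc2) acc
    = acc + (if (PySem.Dict.mk detection).get? "type" = some "file_existence" then
        pvH files ((PySem.Dict.mk detection).get? "filename") else 0) := by
  rw [PySem.List.foldl_ite_add_one]
  by_cases ht : (PySem.Dict.mk detection).get? "type" = some "file_existence"
  · simp only [ht, if_pos, true_and, pvH]
    cases hf : (PySem.Dict.mk detection).get? "filename" with
    | none => simp
    | some n =>
      simp only [PySem.Dict.getD_counter]
      congr 1
      rw [List.count_eq_countP]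
      congr 1
      apply List.countP_congr
      intro x _
      simp only [decide_eq_true_eq, Option.some.injEq, beq_iff_eq]
  · have hz : List.countP (fun file =>
        decide ((PySem.Dict.mk detection).get? "type" = some "file_existence" ∧
          some file = (PySem.Dict.mk detection).get? "filename")) files = 0 := by
      apply List.countP_eq_zero.mpr
      intro f _
      simp only [decide_eq_true_eq]
      exact fun h => ht h.1
    rw [if_neg ht, hz]
    simp

-- A is the plain sum of pvH over the filtered-and-mapped list of filenames.
lemma a_as_sum (detection_lists : List (List (String × String))) (files : List String) :
    compute_prob detection_lists files
    = (((detection_lists.filter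
          (fun d => (PySem.Dict.mk d).get? "type" == some "file_existence")).map
        (fun d => (PySem.Dict.mk d).get? "filename")).map (pvH files)).sum := by
  unfold compute_prob
  have h : ∀ (acc : Int),
      detection_lists.foldl (fun acc detection =>
        files.foldl (fun acc2 file =>
          if (PySem.Dict.mk detection).get? "type" = some "file_existence" ∧
             some file = (PySem.Dict.mk detection).get? "filename" then acc2 + 1 else acc2) acc) acc
      = acc + (((detection_lists.filter
            (fun d => (PySem.Dict.mk d).get? "type" == some "file_existence")).map
          (fun d => (PySem.Dict.mk d).get? "filename")).map (pvH files)).sum := by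
    induction detection_lists with
    | nil => simp
    | cons d t ih =>
      intro acc
      simp only [List.foldl_cons]
      rw [inner_eq, ih]
      by_cases hc : (PySem.Dict.mk d).get? "type" = some "file_existence"
      · simp [hc, add_assoc]
      · simp [hc]
  simpa using h 0

-- counting is independent of which (lawful) BEq instance is used
lemma count_decEq_eq {α : Type} [DecidableEq α] [BEq α] [LawfulBEq α] (k : α) (L : List α) :
    @List.count α instBEqOfDecidableEq k L = L.count k := by
  rw [@List.count_eq_countP _ instBEqOfDecidableEq, @List.count_eq_countP _ _]
  apply List.countP_congr
  intro x _
  simp only [beq_iff_eq]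

-- Grouping: the sum of g over a list equals the sum of count·g over its distinct elements.
lemma sum_group {α : Type} [DecidableEq α] [BEq α] [LawfulBEq α] (L : List α) (g : α → Int) :
    (L.map g).sum
    = ((PySem.Set.ofList L).map (fun k => (L.count k : Int) * g k)).sum := by
  have hfin : (PySem.Set.ofList L).toFinset = L.toFinset := by
    ext x
    simp [List.mem_toFinset, PySem.Set.mem_ofList]
  rw [Finset.sum_list_map_count L g,
    ← List.sum_toFinset _ (PySem.Set.nodup_ofList L), hfin]
  apply Finset.sum_congr rfl
  intro m _
  rw [count_decEq_eq, nsmul_eq_mul]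

-- ===== VERDICT (by name: the statement is the Claim_ definition above) =====
theorem compute_prob_spec : Claim_equal_compute_prob := by
  intro dls files _
  unfold Spec_compute_prob
  show compute_prob dls files =
    (PySem.Dict.counter
        ((dls.filter
            (fun d => (PySem.Dict.mk d).get? "type" == some "file_existence")).map
          (fun d => (PySem.Dict.mk d).get? "filename"))).items.foldl
      (fun total kv =>
        total + kv.2 * (match kv.1 with
                        | none => 0
                        | some n => (PySem.Dict.counter files).getD n 0)) 0
  rw [a_as_sum, PySem.Dict.items_counter,
    PySem.List.foldl_add (g := fun kv : Option String × Int =>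
      kv.2 * (match kv.1 with
              | none => 0
              | some n => (PySem.Dict.counter files).getD n 0))]
  rw [sum_group]
  simp [List.map_map, Function.comp_def, pvH]
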